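-- pv_equiv track=rewrite | github.com/CodeForExampleHere/WeiboCrawlerExample | weibo_crawler/utils.py | url_to_mid
-- ===== SOURCE A (Python) =====
-- ALPHABET = "0123456789abcdefghijklmnopqrstuvwxyzABCDEFGHIJKLMNOPQRSTUVWXYZ"
--
-- def base62_decode(string, alphabet=ALPHABET):
--     """Decode a Base X encoded string into the number
--
--     Arguments:
--     - `string`: The encoded string
--     - `alphabet`: The alphabet to use for encoding
--     """
--     base = len(alphabet)
--     strlen = len(string)
--     num = 0
--
--     idx = 0
--     for char in string:
--         power = (strlen - (idx + 1))
--         num += alphabet.index(char) * (base ** power)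
--         idx += 1
--
--     return num
--
-- def url_to_mid(url):
--     url = str(url)[::-1]
--     size = int(len(url) / 4) if len(url) % 4 == 0 else int(len(url) / 4) + 1
--     result = []
--     for i in range(size):
--         s = url[i * 4: (i + 1) * 4][::-1]
--         s = str(base62_decode(str(s)))
--         s_len = len(s)
--         if i < size - 1 and s_len < 7:
--             s = (7 - s_len) * '0' + s
--         result.append(s)
--     result.reverse()
--     return int(''.join(result))
-- ===== SOURCE B (Python) =====
-- ALPHABET = "0123456789abcdefghijklmnopqrstuvwxyzABCDEFGHIJKLMNOPQRSTUVWXYZ"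
--
-- def _b62(s):
--     # Horner's method instead of summing index * base**power
--     num = 0
--     for ch in s:
--         num = num * 62 + ALPHABET.index(ch)
--     return num
--
-- def _parts(s):
--     # recursively peel 4-char groups off the RIGHT of the original string;
--     # every group except the leading one is zero-padded to 7 digits
--     if len(s) > 4:
--         p = str(_b62(s[-4:]))
--         return _parts(s[:-4]) + ['0' * (7 - len(p)) + p]
--     return [str(_b62(s))]
--
-- def url_to_mid(url):
--     return int(''.join(_parts(str(url))))
-- ===== Notes on version B (the rewrite author's own statement) =====
-- stated objective: alternative
-- what changed: B slices right-anchored 4-char groups off the original string by recursion instead of reversing the whole URL and re-reversing indexed slices, decodes each group with Horner's method (num = num*62 + index) instead of summing index * base**power, and zero-pads with '0' * (7 - len) instead of a conditional prefix.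
import Mathlib
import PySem

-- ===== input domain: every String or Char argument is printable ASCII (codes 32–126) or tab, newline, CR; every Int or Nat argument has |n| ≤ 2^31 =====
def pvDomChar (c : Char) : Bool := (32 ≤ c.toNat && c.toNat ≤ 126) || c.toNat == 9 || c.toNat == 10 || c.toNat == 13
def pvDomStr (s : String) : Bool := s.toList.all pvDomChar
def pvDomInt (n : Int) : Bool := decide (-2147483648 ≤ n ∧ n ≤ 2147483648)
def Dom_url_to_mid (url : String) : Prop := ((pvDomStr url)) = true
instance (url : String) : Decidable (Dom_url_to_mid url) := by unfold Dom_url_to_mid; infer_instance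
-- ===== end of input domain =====

-- B peels right-anchored 4-char groups off the original string recursively and decodes each
-- group by Horner's method, instead of A's reverse-the-whole-string indexed loop with
-- index * base ** power sums (objective: alternative decomposition, same cost).


-- ===== PORT A =====
def ALPHABET : String := "0123456789abcdefghijklmnopqrstuvwxyzABCDEFGHIJKLMNOPQRSTUVWXYZ"

-- alphabet.index(char) = first index of the character (Python raises ValueError when the
-- character is absent — excluded by Pre_; the .getD 0 is never reached under Pre_).
-- base ** power: power = strlen - (idx + 1) is never negative in this loop, so .toNat is exact.
def base62_decode (string : List Char) (alphabet : List Char) : Int :=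
  let base : Int := alphabet.length
  let strlen : Int := string.length
  (string.foldl
    (fun (p : Int × Int) char =>
      (p.1 + ((PySem.List.index? alphabet char).getD 0 : Int) * base ^ (strlen - (p.2 + 1)).toNat,
       p.2 + 1))
    (0, 0)).1

-- the element appended by one iteration of A's loop (s = url[i*4:(i+1)*4][::-1], decode,
-- zero-pad to 7 digits on every chunk but the last)
def pvAElem (u : List Char) (size : Int) (i : Int) : List Char :=
  let s := (PySem.List.slice u (some (i * 4)) (some ((i + 1) * 4))).reverse
  let t := PySem.Int.toChars (base62_decode s ALPHABET.toList)
  let tlen : Int := t.length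
  if i < size - 1 ∧ tlen < 7 then List.replicate (7 - tlen).toNat '0' ++ t else t

def url_to_mid (url : String) : Int :=
  let u : List Char := url.toList.reverse          -- url = str(url)[::-1]
  let n : Int := u.length
  -- int(len(url)/4): truncated float division = n // 4 for 0 ≤ n
  let size : Int := if PySem.Int.mod n 4 = 0 then PySem.Int.floordiv n 4
                    else PySem.Int.floordiv n 4 + 1
  let result : List (List Char) :=
    (PySem.List.pyRange 0 size 1).foldl (fun res i => res ++ [pvAElem u size i]) []
  -- int(''.join(result)): none exactly on the empty join (url = "") — excluded by Pre_
  (PySem.Int.ofChars? (PySem.Chars.join [] result.reverse)).getD 0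

-- ===== PORT B =====
-- Horner decode: num = num * 62 + ALPHABET.index(ch)
def pvB62 (s : List Char) : Int :=
  s.foldl (fun num ch => num * 62 + ((PySem.List.index? ALPHABET.toList ch).getD 0 : Int)) 0

-- _parts: s[-4:] = s.drop (len-4), s[:-4] = s.take (len-4) (PySem.List.slice_from_neg_natCast /
-- slice_to_neg_natCast); '0' * (7 - len(p)) is empty when len(p) ≥ 7, hence the .toNat.
def pvParts (s : List Char) : List (List Char) :=
  if s.length > 4 then
    let p := PySem.Int.toChars (pvB62 (s.drop (s.length - 4)))
    pvParts (s.take (s.length - 4)) ++ [List.replicate ((7 - (p.length : Int)).toNat) '0' ++ p]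
  else [PySem.Int.toChars (pvB62 s)]
termination_by s.length
decreasing_by simp [List.length_take]; omega

def url_to_mid_alt (url : String) : Int :=
  (PySem.Int.ofChars? (PySem.Chars.join [] (pvParts url.toList))).getD 0

-- ===== PRECONDITION & SPEC =====
-- Pre_ excludes exactly the inputs where A raises ValueError: the empty string (int('') in the
-- final conversion) and strings containing a character outside ALPHABET (alphabet.index).
-- a character of ALPHABET = an ASCII digit, lowercase or uppercase letter
def pvAlnumChar (c : Char) : Bool :=
  (48 ≤ c.toNat && c.toNat ≤ 57) || (97 ≤ c.toNat && c.toNat ≤ 122) || (65 ≤ c.toNat && c.toNat ≤ 90)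
def Pre_url_to_mid (url : String) : Prop :=
  url.toList ≠ [] ∧ url.toList.all pvAlnumChar = true
instance (url : String) : Decidable (Pre_url_to_mid url) := by unfold Pre_url_to_mid; infer_instance
def pvWitness_url_to_mid : String := "z0A9c"

def Spec_url_to_mid (url : String) (out : Int) : Prop := out = url_to_mid_alt url
instance (url : String) (out : Int) : Decidable (Spec_url_to_mid url out) := by unfold Spec_url_to_mid; infer_instance

-- ===== CLAIM (what is proved, stated in full; the proofs are below) =====
def Claim_equal_url_to_mid : Prop := ∀ (url : String), Dom_url_to_mid url → Pre_url_to_mid url → Spec_url_to_mid url (url_to_mid url)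

-- ===== LEMMAS AND PROOFS =====

-- size of A's chunk loop / number of B's groups, on the Nat side
def pvSizeN (n : Nat) : Nat := if n % 4 = 0 then n / 4 else n / 4 + 1

lemma pvSize_cast (n : Nat) :
    (if PySem.Int.mod (n : Int) 4 = 0 then PySem.Int.floordiv (n : Int) 4
     else PySem.Int.floordiv (n : Int) 4 + 1) = (pvSizeN n : Int) := by
  rw [show (4 : Int) = ((4 : Nat) : Int) from rfl, PySem.Int.mod_natCast, PySem.Int.floordiv_natCast]
  unfold pvSizeN
  split_ifs <;> omega

lemma pvSlice4 (xs : List Char) (k : Nat) :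
    PySem.List.slice xs (some (((k : Nat) : Int) * 4)) (some ((((k : Nat) : Int) + 1) * 4))
      = List.take 4 (List.drop (4 * k) xs) := by
  have e1 : (((k : Nat) : Int) * 4) = ((k * 4 : Nat) : Int) := by push_cast; ring
  have e2 : ((((k : Nat) : Int) + 1) * 4) = (((k + 1) * 4 : Nat) : Int) := by push_cast; ring
  have e3 : (k + 1) * 4 - k * 4 = 4 := by omega
  have e4 : k * 4 = 4 * k := by omega
  rw [e1, e2, PySem.List.slice_natCast, e3, e4]

lemma pvB62_shift (cs : List Char) (a : Int) :
    cs.foldl (fun num ch => num * 62 + ((PySem.List.index? ALPHABET.toList ch).getD 0 : Int)) a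
      = a * 62 ^ cs.length + pvB62 cs := by
  induction cs generalizing a with
  | nil => simp [pvB62]
  | cons c cs ih =>
    have hb : pvB62 (c :: cs)
        = cs.foldl (fun num ch => num * 62 + ((PySem.List.index? ALPHABET.toList ch).getD 0 : Int))
            (0 * 62 + ((PySem.List.index? ALPHABET.toList c).getD 0 : Int)) := rfl
    rw [List.foldl_cons, ih, hb, ih]
    simp only [List.length_cons]
    ring

lemma pvAfold (cs : List Char) (num i s : Int) (h : i + cs.length = s) :
    (cs.foldl
      (fun (p : Int × Int) char =>
        (p.1 + ((PySem.List.index? ALPHABET.toList char).getD 0 : Int) * (62 : Int) ^ (s - (p.2 + 1)).toNat,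
         p.2 + 1))
      (num, i)).1 = num + pvB62 cs := by
  induction cs generalizing num i with
  | nil => simp [pvB62]
  | cons c cs ih =>
    rw [List.foldl_cons]
    have hlen : (s - (i + 1)).toNat = cs.length := by
      simp only [List.length_cons] at h; push_cast at h; omega
    have h' : (i + 1) + (cs.length : Int) = s := by
      simp only [List.length_cons] at h; push_cast at h ⊢; omega
    rw [ih _ _ h', hlen]
    have hb : pvB62 (c :: cs)
        = cs.foldl (fun num ch => num * 62 + ((PySem.List.index? ALPHABET.toList ch).getD 0 : Int))
            (0 * 62 + ((PySem.List.index? ALPHABET.toList c).getD 0 : Int)) := rfl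
    rw [hb, pvB62_shift]
    ring

lemma pvDecode_eq (cs : List Char) : base62_decode cs ALPHABET.toList = pvB62 cs := by
  have hbase : ((ALPHABET.toList.length : Nat) : Int) = 62 := by decide
  unfold base62_decode
  simp only [hbase]
  simpa using pvAfold cs 0 0 (cs.length : Int) (by omega)

lemma pvPad_eq (p : List Char) :
    (if ((p.length : Nat) : Int) < 7 then List.replicate ((7 - ((p.length : Nat) : Int)).toNat) '0' ++ p else p)
      = List.replicate ((7 - ((p.length : Nat) : Int)).toNat) '0' ++ p := by
  split_ifs with h
  · rfl
  · have h0 : ((7 : Int) - ((p.length : Nat) : Int)).toNat = 0 := by omega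
    simp [h0]

-- the chunk A reads at index i + 1 of l is the chunk it reads at index i of l minus its last
-- 4 characters, with the same padding decision
lemma pvAElem_shift (l : List Char) (k : Nat) :
    pvAElem l.reverse (((pvSizeN (l.length - 4) + 1 : Nat)) : Int) (((k + 1 : Nat)) : Int)
      = pvAElem (l.take (l.length - 4)).reverse ((pvSizeN (l.length - 4) : Nat) : Int) ((k : Nat) : Int) := by
  have hdrop : List.drop 4 l.reverse = (List.take (l.length - 4) l).reverse := by
    rw [List.drop_reverse]
  have e : 4 * (k + 1) = 4 + 4 * k := by omega
  have hchunk : List.take 4 (List.drop (4 * (k + 1)) l.reverse)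
      = List.take 4 (List.drop (4 * k) (List.take (l.length - 4) l).reverse) := by
    rw [← hdrop, List.drop_drop, e]
  have hcond : ((((k + 1 : Nat)) : Int) < (((pvSizeN (l.length - 4) + 1 : Nat)) : Int) - 1)
      ↔ (((k : Nat) : Int) < ((pvSizeN (l.length - 4) : Nat) : Int) - 1) := by
    push_cast; omega
  simp only [pvAElem]
  rw [pvSlice4 l.reverse (k + 1), pvSlice4 (List.take (l.length - 4) l).reverse k, hchunk]
  exact if_congr (and_congr hcond Iff.rfl) rfl rfl

lemma pvAElems_eq : ∀ (N : Nat) (l : List Char), l.length = N → l ≠ [] →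
    (List.range (pvSizeN l.length)).map
        (fun k => pvAElem l.reverse ((pvSizeN l.length : Nat) : Int) ((k : Nat) : Int))
      = (pvParts l).reverse := by
  intro N
  induction N using Nat.strong_induction_on with
  | _ N ih =>
    intro l hN hl
    by_cases hgt : l.length > 4
    · -- peel the last 4 characters
      have hm1 : 1 ≤ pvSizeN (l.length - 4) := by unfold pvSizeN; split_ifs <;> omega
      have hsz : pvSizeN l.length = pvSizeN (l.length - 4) + 1 := by
        unfold pvSizeN; split_ifs <;> omega
      have hlen' : (l.take (l.length - 4)).length = l.length - 4 := by
        simp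
      have hne' : l.take (l.length - 4) ≠ [] := by
        intro h
        have := congrArg List.length h
        rw [hlen'] at this
        simp at this
        omega
      have hparts : pvParts l
          = pvParts (l.take (l.length - 4))
            ++ [List.replicate ((7 - ((PySem.Int.toChars (pvB62 (l.drop (l.length - 4)))).length : Int)).toNat) '0'
                ++ PySem.Int.toChars (pvB62 (l.drop (l.length - 4)))] := by
        rw [pvParts]
        simp only [if_pos hgt]
      rw [hsz, List.range_succ_eq_map, List.map_cons, List.map_map, hparts]
      simp only [List.reverse_append, List.reverse_cons, List.reverse_nil, List.nil_append,
        List.singleton_append]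
      congr 1
      · -- the head chunk: A's chunk 0 is the last 4 characters, always padded
        simp only [pvAElem]
        rw [show ((0 : Nat) : Int) = (((0 : Nat)) : Int) from rfl]
        rw [pvSlice4 l.reverse 0]
        rw [show (4 * 0 : Nat) = 0 from rfl, List.drop_zero]
        rw [List.take_reverse, List.reverse_reverse, pvDecode_eq]
        have hc : (((0 : Nat)) : Int) < (((pvSizeN (l.length - 4) + 1 : Nat)) : Int) - 1 := by
          push_cast; omega
        simp only [hc, true_and]
        exact pvPad_eq _
      · -- the tail chunks: induction hypothesis on l minus its last 4 characters
        rw [← ih (l.length - 4) (by omega) (l.take (l.length - 4)) hlen' hne', hlen']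
        apply List.map_congr_left
        intro k _
        simpa using pvAElem_shift l k
    · -- a single, unpadded chunk
      have hn1 : 1 ≤ l.length := by
        cases l with
        | nil => exact absurd rfl hl
        | cons c cs => simp
      have hsz : pvSizeN l.length = 1 := by
        unfold pvSizeN; split_ifs <;> omega
      have hparts : pvParts l = [PySem.Int.toChars (pvB62 l)] := by
        rw [pvParts]
        simp [hgt]
      rw [hsz, hparts]
      simp only [List.range_one, List.map_cons, List.map_nil, pvAElem]
      rw [show ((0 : Nat) : Int) = (((0 : Nat)) : Int) from rfl]
      rw [pvSlice4 l.reverse 0]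
      rw [show (4 * 0 : Nat) = 0 from rfl, List.drop_zero]
      rw [List.take_of_length_le (by simp; omega), List.reverse_reverse, pvDecode_eq]
      have hcf : ¬((((0 : Nat)) : Int) < (((1 : Nat)) : Int) - 1
          ∧ (((PySem.Int.toChars (pvB62 l)).length : Nat) : Int) < 7) := by
        intro h
        have := h.1
        push_cast at this
      rw [if_neg hcf]
      simp

-- ===== VERDICT (by name: the statement is the Claim_ definition above) =====
theorem url_to_mid_spec : Claim_equal_url_to_mid := by
  intro url _ hpre
  unfold Spec_url_to_mid
  simp only [url_to_mid, url_to_mid_alt, List.length_reverse]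
  rw [pvSize_cast, PySem.List.pyRange_one, List.foldl_map,
    PySem.List.foldl_append_singleton_eq_map]
  simp only [Int.sub_zero, Int.toNat_natCast, zero_add, List.nil_append]
  rw [pvAElems_eq url.toList.length url.toList rfl hpre.1, List.reverse_reverse]
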